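-- pv_equiv track=rewrite | github.com/saibusiness0102-lgtm/TrueCrimeBot | bot.py | detect_topic_type
-- ===== SOURCE A (Python) =====
-- def detect_topic_type(text):
--     text = text.lower()
--     if any(w in text for w in ["serial","spree","multiple victim"]):    return "serial"
--     if any(w in text for w in ["rape","sexual assault","molest"]):       return "assault"
--     if any(w in text for w in ["caste","dalit","honor killing","dowry"]): return "caste"
--     if any(w in text for w in ["poison","poisoning","arsenic","cyanide"]): return "poison"
--     if any(w in text for w in ["fraud","scam","ponzi","embezzle","con"]): return "fraud"
--     if any(w in text for w in ["missing","disappear","vanish"]):         return "missing"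
--     if any(w in text for w in ["murder","homicide","kill","stabbed","shot","strangled"]): return "murder"
--     if any(w in text for w in ["theft","heist","robbery","stolen","burglar"]): return "heist"
--     if any(w in text for w in ["cult","sect","ritual","sacrifice"]):     return "cult"
--     if any(w in text for w in ["unsolved","mystery","unknown","unidentified"]): return "unsolved"
--     if any(w in text for w in ["cold case","decades","reopened"]):       return "coldcase"
--     if any(w in text for w in ["conspiracy","cover","government","corrupt"]): return "conspiracy"
--     if any(w in text for w in ["kidnap","abduct","ransom","hostage"]):   return "kidnap"
--     return "other"
-- ===== SOURCE B (Python) =====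
-- # Single flat keyword->priority index; one pass computes the minimum matching
-- # priority, then the label is looked up by that index (no per-rule early-return chain).
-- RULES = [
--     ("serial",     ["serial", "spree", "multiple victim"]),
--     ("assault",    ["rape", "sexual assault", "molest"]),
--     ("caste",      ["caste", "dalit", "honor killing", "dowry"]),
--     ("poison",     ["poison", "poisoning", "arsenic", "cyanide"]),
--     ("fraud",      ["fraud", "scam", "ponzi", "embezzle", "con"]),
--     ("missing",    ["missing", "disappear", "vanish"]),
--     ("murder",     ["murder", "homicide", "kill", "stabbed", "shot", "strangled"]),
--     ("heist",      ["theft", "heist", "robbery", "stolen", "burglar"]),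
--     ("cult",       ["cult", "sect", "ritual", "sacrifice"]),
--     ("unsolved",   ["unsolved", "mystery", "unknown", "unidentified"]),
--     ("coldcase",   ["cold case", "decades", "reopened"]),
--     ("conspiracy", ["conspiracy", "cover", "government", "corrupt"]),
--     ("kidnap",     ["kidnap", "abduct", "ransom", "hostage"]),
-- ]
-- LABELS = [label for label, _ in RULES]
-- FLAT = [(kw, i) for i, (_, kws) in enumerate(RULES) for kw in kws]
--
-- def detect_topic_type(text):
--     t = text.lower()
--     best = len(LABELS)
--     for kw, i in FLAT:
--         if kw in t:
--             best = min(best, i)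
--     return LABELS[best] if best < len(LABELS) else "other"
-- ===== Notes on version B (the rewrite author's own statement) =====
-- stated objective: alternative
-- what changed: Replaces the early-return if/any chain with a flat keyword->priority index scanned in one full pass that folds a minimum matching priority, then maps that index to its label.
import Mathlib
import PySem

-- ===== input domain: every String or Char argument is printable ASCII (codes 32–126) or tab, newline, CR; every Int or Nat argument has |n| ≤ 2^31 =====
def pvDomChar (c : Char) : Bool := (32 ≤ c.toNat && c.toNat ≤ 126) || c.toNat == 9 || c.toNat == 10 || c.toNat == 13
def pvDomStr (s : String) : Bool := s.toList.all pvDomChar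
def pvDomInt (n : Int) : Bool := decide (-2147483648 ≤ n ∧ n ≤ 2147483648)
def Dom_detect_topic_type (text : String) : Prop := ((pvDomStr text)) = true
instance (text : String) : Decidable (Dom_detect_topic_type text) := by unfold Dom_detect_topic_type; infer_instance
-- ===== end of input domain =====

-- B replaces A's early-return if/any chain by a flat keyword->priority index,
-- a full-pass fold of the minimum matching priority, and a label lookup (objective: alternative).

-- ===== PORT A =====
def detect_topic_type (text : String) : String :=
  let text := PySem.Str.lower text
  if ["serial","spree","multiple victim"].any (fun w => PySem.Str.isIn w text) then "serial"
  else if ["rape","sexual assault","molest"].any (fun w => PySem.Str.isIn w text) then "assault"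
  else if ["caste","dalit","honor killing","dowry"].any (fun w => PySem.Str.isIn w text) then "caste"
  else if ["poison","poisoning","arsenic","cyanide"].any (fun w => PySem.Str.isIn w text) then "poison"
  else if ["fraud","scam","ponzi","embezzle","con"].any (fun w => PySem.Str.isIn w text) then "fraud"
  else if ["missing","disappear","vanish"].any (fun w => PySem.Str.isIn w text) then "missing"
  else if ["murder","homicide","kill","stabbed","shot","strangled"].any (fun w => PySem.Str.isIn w text) then "murder"
  else if ["theft","heist","robbery","stolen","burglar"].any (fun w => PySem.Str.isIn w text) then "heist"
  else if ["cult","sect","ritual","sacrifice"].any (fun w => PySem.Str.isIn w text) then "cult"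
  else if ["unsolved","mystery","unknown","unidentified"].any (fun w => PySem.Str.isIn w text) then "unsolved"
  else if ["cold case","decades","reopened"].any (fun w => PySem.Str.isIn w text) then "coldcase"
  else if ["conspiracy","cover","government","corrupt"].any (fun w => PySem.Str.isIn w text) then "conspiracy"
  else if ["kidnap","abduct","ransom","hostage"].any (fun w => PySem.Str.isIn w text) then "kidnap"
  else "other"

-- ===== PORT B =====
def pvRulesB : List (String × List String) :=
  [("serial",     ["serial", "spree", "multiple victim"]),
   ("assault",    ["rape", "sexual assault", "molest"]),
   ("caste",      ["caste", "dalit", "honor killing", "dowry"]),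
   ("poison",     ["poison", "poisoning", "arsenic", "cyanide"]),
   ("fraud",      ["fraud", "scam", "ponzi", "embezzle", "con"]),
   ("missing",    ["missing", "disappear", "vanish"]),
   ("murder",     ["murder", "homicide", "kill", "stabbed", "shot", "strangled"]),
   ("heist",      ["theft", "heist", "robbery", "stolen", "burglar"]),
   ("cult",       ["cult", "sect", "ritual", "sacrifice"]),
   ("unsolved",   ["unsolved", "mystery", "unknown", "unidentified"]),
   ("coldcase",   ["cold case", "decades", "reopened"]),
   ("conspiracy", ["conspiracy", "cover", "government", "corrupt"]),
   ("kidnap",     ["kidnap", "abduct", "ransom", "hostage"])]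

def pvLabelsB : List String := pvRulesB.map Prod.fst

-- FLAT = [(kw, i) for i, (_, kws) in enumerate(RULES) for kw in kws]
def pvFlatten : Nat → List (String × List String) → List (String × Nat)
  | _, [] => []
  | i, (_, kws) :: rest => kws.map (fun w => (w, i)) ++ pvFlatten (i + 1) rest

def pvFlatB : List (String × Nat) := pvFlatten 0 pvRulesB

def detect_topic_type_alt (text : String) : String :=
  let t := PySem.Str.lower text
  let best := pvFlatB.foldl
    (fun acc p => if PySem.Str.isIn p.1 t then min acc p.2 else acc) pvLabelsB.length
  if best < pvLabelsB.length then pvLabelsB.getD best "other" else "other"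

-- ===== PRECONDITION & SPEC =====
def Spec_detect_topic_type (text : String) (out : String) : Prop := out = detect_topic_type_alt text
instance (text : String) (out : String) : Decidable (Spec_detect_topic_type text out) := by unfold Spec_detect_topic_type; infer_instance

-- ===== CLAIM (what is proved, stated in full; the proofs are below) =====
def Claim_equal_detect_topic_type : Prop := ∀ (text : String), Dom_detect_topic_type text → Spec_detect_topic_type text (detect_topic_type text)

-- ===== LEMMAS AND PROOFS =====

-- first-match selector used only to describe the fold's value
def pvSel (t : String) : List (String × List String) → Nat → Nat → Nat
  | [], _, acc => acc
  | (_, kws) :: rest, k, acc =>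
      if kws.any (fun w => PySem.Str.isIn w t) then k else pvSel t rest (k + 1) acc

theorem pvFlatten_idx_ge (k : Nat) (rules : List (String × List String)) :
    ∀ p ∈ pvFlatten k rules, k ≤ p.2 := by
  induction rules generalizing k with
  | nil => simp [pvFlatten]
  | cons r rest ih =>
      intro p hp
      simp only [pvFlatten, List.mem_append, List.mem_map] at hp
      rcases hp with ⟨w, _, rfl⟩ | hp
      · exact le_refl k
      · exact Nat.le_of_succ_le (ih (k + 1) p hp)

theorem pvFold_absorb (t : String) (l : List (String × Nat)) (acc : Nat)
    (h : ∀ p ∈ l, acc ≤ p.2) :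
    l.foldl (fun acc p => if PySem.Str.isIn p.1 t then min acc p.2 else acc) acc = acc := by
  induction l with
  | nil => rfl
  | cons p rest ih =>
      simp only [List.foldl_cons]
      have hacc : acc ≤ p.2 := h p (List.mem_cons_self ..)
      rw [show (if PySem.Str.isIn p.1 t then min acc p.2 else acc) = acc by
        split <;> simp [Nat.min_eq_left hacc]]
      exact ih (fun q hq => h q (List.mem_cons_of_mem _ hq))

theorem pvFold_group (t : String) (kws : List String) (i acc : Nat) :
    (kws.map (fun w => (w, i))).foldl
      (fun acc p => if PySem.Str.isIn p.1 t then min acc p.2 else acc) acc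
    = if kws.any (fun w => PySem.Str.isIn w t) then min acc i else acc := by
  induction kws generalizing acc with
  | nil => rfl
  | cons w rest ih =>
      simp only [List.map_cons, List.foldl_cons, List.any_cons, Bool.or_eq_true]
      by_cases hw : PySem.Str.isIn w t = true
      · rw [if_pos hw, if_pos (Or.inl hw), ih]
        split <;> simp
      · rw [if_neg hw, ih]
        by_cases hr : rest.any (fun w => PySem.Str.isIn w t) = true
        · rw [if_pos hr, if_pos (Or.inr hr)]
        · rw [if_neg hr, if_neg (by tauto)]

theorem pvFold_flatten (t : String) (rules : List (String × List String))
    (k acc : Nat) (h : k + rules.length ≤ acc) :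
    (pvFlatten k rules).foldl
      (fun acc p => if PySem.Str.isIn p.1 t then min acc p.2 else acc) acc
    = pvSel t rules k acc := by
  induction rules generalizing k acc with
  | nil => rfl
  | cons r rest ih =>
      obtain ⟨label, kws⟩ := r
      have hk : k ≤ acc := by simp only [List.length_cons] at h; omega
      simp only [pvFlatten, List.foldl_append, pvFold_group, pvSel]
      by_cases hm : kws.any (fun w => PySem.Str.isIn w t) = true
      · rw [if_pos hm, if_pos hm, Nat.min_eq_right hk]
        exact pvFold_absorb t _ k
          (fun p hp => le_trans (Nat.le_succ k) (pvFlatten_idx_ge (k + 1) rest p hp))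
      · rw [if_neg hm, if_neg hm]
        exact ih (k + 1) acc (by simp only [List.length_cons] at h; omega)

-- ===== VERDICT (by name: the statement is the Claim_ definition above) =====
set_option maxHeartbeats 1000000 in
theorem detect_topic_type_spec : Claim_equal_detect_topic_type := by
  intro text _
  show detect_topic_type text = detect_topic_type_alt text
  simp only [detect_topic_type, detect_topic_type_alt, pvFlatB]
  rw [pvFold_flatten _ _ _ _ (by decide)]
  simp only [pvRulesB, pvLabelsB, List.map_cons, List.map_nil, List.length_cons,
    List.length_nil, pvSel]
  by_cases h1 : (List.any ["serial","spree","multiple victim"] (fun w => PySem.Str.isIn w (PySem.Str.lower text))) = true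
  · rw [if_pos h1, if_pos h1]; rfl
  · rw [if_neg h1, if_neg h1]
    by_cases h2 : (List.any ["rape","sexual assault","molest"] (fun w => PySem.Str.isIn w (PySem.Str.lower text))) = true
    · rw [if_pos h2, if_pos h2]; rfl
    · rw [if_neg h2, if_neg h2]
      by_cases h3 : (List.any ["caste","dalit","honor killing","dowry"] (fun w => PySem.Str.isIn w (PySem.Str.lower text))) = true
      · rw [if_pos h3, if_pos h3]; rfl
      · rw [if_neg h3, if_neg h3]
        by_cases h4 : (List.any ["poison","poisoning","arsenic","cyanide"] (fun w => PySem.Str.isIn w (PySem.Str.lower text))) = true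
        · rw [if_pos h4, if_pos h4]; rfl
        · rw [if_neg h4, if_neg h4]
          by_cases h5 : (List.any ["fraud","scam","ponzi","embezzle","con"] (fun w => PySem.Str.isIn w (PySem.Str.lower text))) = true
          · rw [if_pos h5, if_pos h5]; rfl
          · rw [if_neg h5, if_neg h5]
            by_cases h6 : (List.any ["missing","disappear","vanish"] (fun w => PySem.Str.isIn w (PySem.Str.lower text))) = true
            · rw [if_pos h6, if_pos h6]; rfl
            · rw [if_neg h6, if_neg h6]
              by_cases h7 : (List.any ["murder","homicide","kill","stabbed","shot","strangled"] (fun w => PySem.Str.isIn w (PySem.Str.lower text))) = true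
              · rw [if_pos h7, if_pos h7]; rfl
              · rw [if_neg h7, if_neg h7]
                by_cases h8 : (List.any ["theft","heist","robbery","stolen","burglar"] (fun w => PySem.Str.isIn w (PySem.Str.lower text))) = true
                · rw [if_pos h8, if_pos h8]; rfl
                · rw [if_neg h8, if_neg h8]
                  by_cases h9 : (List.any ["cult","sect","ritual","sacrifice"] (fun w => PySem.Str.isIn w (PySem.Str.lower text))) = true
                  · rw [if_pos h9, if_pos h9]; rfl
                  · rw [if_neg h9, if_neg h9]
                    by_cases h10 : (List.any ["unsolved","mystery","unknown","unidentified"] (fun w => PySem.Str.isIn w (PySem.Str.lower text))) = true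
                    · rw [if_pos h10, if_pos h10]; rfl
                    · rw [if_neg h10, if_neg h10]
                      by_cases h11 : (List.any ["cold case","decades","reopened"] (fun w => PySem.Str.isIn w (PySem.Str.lower text))) = true
                      · rw [if_pos h11, if_pos h11]; rfl
                      · rw [if_neg h11, if_neg h11]
                        by_cases h12 : (List.any ["conspiracy","cover","government","corrupt"] (fun w => PySem.Str.isIn w (PySem.Str.lower text))) = true
                        · rw [if_pos h12, if_pos h12]; rfl
                        · rw [if_neg h12, if_neg h12]
                          by_cases h13 : (List.any ["kidnap","abduct","ransom","hostage"] (fun w => PySem.Str.isIn w (PySem.Str.lower text))) = true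
                          · rw [if_pos h13, if_pos h13]; rfl
                          · rw [if_neg h13, if_neg h13]
                            rfl
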